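-- pv_equiv track=rewrite | github.com/hhyi01/aoc_2018 | Day 6/p_06.py | get_count_of_closest
-- ===== SOURCE A (Python) =====
-- def get_count_of_closest(set_of_coordinates, min_distance_keys):
--     count_of_closest = {}
--     for coordinate in set_of_coordinates:
--         coord = str(str(coordinate[0]) + ', ' + str(coordinate[1]))
--         if coord not in count_of_closest:
--             count_of_closest[coord] = 0
--         for key in min_distance_keys:
--             if len(min_distance_keys[key]) == 1:
--                 if coord in min_distance_keys[key]:
--                     count_of_closest[coord] += 1
--     return count_of_closest
-- ===== SOURCE B (Python) =====
-- def get_count_of_closest(set_of_coordinates, min_distance_keys):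
--     # Build once: how many singleton closest-lists name each coordinate string.
--     closest_counter = {}
--     for value in min_distance_keys.values():
--         if len(value) == 1:
--             v = value[0]
--             closest_counter[v] = closest_counter.get(v, 0) + 1
--     count_of_closest = {}
--     for coordinate in set_of_coordinates:
--         coord = str(coordinate[0]) + ', ' + str(coordinate[1])
--         count_of_closest[coord] = count_of_closest.get(coord, 0) + closest_counter.get(coord, 0)
--     return count_of_closest
-- ===== Notes on version B (the rewrite author's own statement) =====
-- stated objective: faster
-- what changed: B builds a counter of singleton closest-lists once and then does a single pass over the coordinates adding the counter lookup, instead of A's inner scan over every key of min_distance_keys for each coordinate.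
import Mathlib
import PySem

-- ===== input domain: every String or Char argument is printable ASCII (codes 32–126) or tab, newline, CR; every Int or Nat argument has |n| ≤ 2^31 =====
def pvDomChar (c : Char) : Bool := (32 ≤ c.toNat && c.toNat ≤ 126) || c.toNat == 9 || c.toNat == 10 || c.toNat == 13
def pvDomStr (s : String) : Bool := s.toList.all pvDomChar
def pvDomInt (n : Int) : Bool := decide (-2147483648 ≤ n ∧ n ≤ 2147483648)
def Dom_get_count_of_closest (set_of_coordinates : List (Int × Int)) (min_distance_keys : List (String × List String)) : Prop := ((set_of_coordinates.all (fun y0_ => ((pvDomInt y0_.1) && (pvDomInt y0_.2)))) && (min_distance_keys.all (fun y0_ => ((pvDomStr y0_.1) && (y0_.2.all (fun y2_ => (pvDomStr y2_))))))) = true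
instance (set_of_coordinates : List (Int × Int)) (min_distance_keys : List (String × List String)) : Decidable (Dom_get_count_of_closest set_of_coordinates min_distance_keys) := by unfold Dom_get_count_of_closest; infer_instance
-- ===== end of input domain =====

-- B replaces A's inner scan over all keys (per coordinate) by a counter dict built once; objective: faster.

-- ===== PORT A =====
def get_count_of_closest (set_of_coordinates : List (Int × Int)) (min_distance_keys : List (String × List String)) : List (String × Int) :=
  (set_of_coordinates.foldl (fun count_of_closest coordinate =>
      let coord : String := PySem.Int.toStr coordinate.1 ++ ", " ++ PySem.Int.toStr coordinate.2
      let count_of_closest :=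
        if count_of_closest.contains coord then count_of_closest
        else count_of_closest.insert coord 0
      -- 'for key in min_distance_keys: … min_distance_keys[key] …' — iterate the keys, look each up in the dict
      min_distance_keys.foldl (fun count_of_closest kv =>
          let value := (PySem.Dict.mk min_distance_keys).getD kv.1 []
          if value.length == 1 then
            if value.contains coord then count_of_closest.modify coord 0 (· + 1)
            else count_of_closest
          else count_of_closest)
        count_of_closest)
    PySem.Dict.empty).items

-- ===== PORT B =====
def get_count_of_closest_alt (set_of_coordinates : List (Int × Int)) (min_distance_keys : List (String × List String)) : List (String × Int) :=
  let closest_counter : PySem.Dict String Int :=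
    min_distance_keys.foldl (fun closest_counter kv =>
        let value := kv.2
        if value.length == 1 then
          let v := PySem.List.pyGetD value 0 ""
          closest_counter.insert v (closest_counter.getD v 0 + 1)
        else closest_counter)
      PySem.Dict.empty
  (set_of_coordinates.foldl (fun count_of_closest coordinate =>
      let coord : String := PySem.Int.toStr coordinate.1 ++ ", " ++ PySem.Int.toStr coordinate.2
      count_of_closest.insert coord
        (count_of_closest.getD coord 0 + closest_counter.getD coord 0))
    PySem.Dict.empty).items

-- ===== PRECONDITION & SPEC =====
-- Pre_ excludes assoc lists with duplicate keys in min_distance_keys: a Python dict argument cannot carry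
-- duplicate keys (later entries silently overwrite earlier ones), so such encodings are ambiguous corners.
def Pre_get_count_of_closest (set_of_coordinates : List (Int × Int)) (min_distance_keys : List (String × List String)) : Prop :=
  (min_distance_keys.map Prod.fst).Nodup
instance (set_of_coordinates : List (Int × Int)) (min_distance_keys : List (String × List String)) : Decidable (Pre_get_count_of_closest set_of_coordinates min_distance_keys) := by unfold Pre_get_count_of_closest; infer_instance

def pvWitness_get_count_of_closest : (List (Int × Int)) × (List (String × List String)) :=
  ([(1, 2), (3, -4), (1, 2)], [("A", ["1, 2"]), ("B", ["1, 2", "3, -4"]), ("C", ["3, -4"])])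

def Spec_get_count_of_closest (set_of_coordinates : List (Int × Int)) (min_distance_keys : List (String × List String)) (out : List (String × Int)) : Prop := out = get_count_of_closest_alt set_of_coordinates min_distance_keys
instance (set_of_coordinates : List (Int × Int)) (min_distance_keys : List (String × List String)) (out : List (String × Int)) : Decidable (Spec_get_count_of_closest set_of_coordinates min_distance_keys out) := by unfold Spec_get_count_of_closest; infer_instance

-- ===== CLAIM (what is proved, stated in full; the proofs are below) =====
def Claim_equal_get_count_of_closest : Prop := ∀ (set_of_coordinates : List (Int × Int)) (min_distance_keys : List (String × List String)), Dom_get_count_of_closest set_of_coordinates min_distance_keys → Pre_get_count_of_closest set_of_coordinates min_distance_keys → Spec_get_count_of_closest set_of_coordinates min_distance_keys (get_count_of_closest set_of_coordinates min_distance_keys)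

-- ===== LEMMAS AND PROOFS =====

-- the coordinate string, and the number of singleton closest-lists naming the string s
def pvStr (coordinate : Int × Int) : String :=
  PySem.Int.toStr coordinate.1 ++ ", " ++ PySem.Int.toStr coordinate.2
def pvSingCount (min_distance_keys : List (String × List String)) (s : String) : Int :=
  ((min_distance_keys.filter (fun kv => kv.2.length == 1 && kv.2.contains s)).length : Int)
-- the common canonical step both ports reduce to
def pvCanon (min_distance_keys : List (String × List String))
    (d : PySem.Dict String Int) (coordinate : Int × Int) : PySem.Dict String Int :=
  d.insert (pvStr coordinate) (d.getD (pvStr coordinate) 0 + pvSingCount min_distance_keys (pvStr coordinate))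

-- B's counter holds exactly pvSingCount
theorem pv_counter_getD (min_distance_keys : List (String × List String)) (s : String)
    (d : PySem.Dict String Int) :
    (min_distance_keys.foldl (fun closest_counter kv =>
        if kv.2.length == 1 then
          closest_counter.insert (PySem.List.pyGetD kv.2 0 "")
            (closest_counter.getD (PySem.List.pyGetD kv.2 0 "") 0 + 1)
        else closest_counter) d).getD s 0
      = d.getD s 0 + pvSingCount min_distance_keys s := by
  induction min_distance_keys generalizing d with
  | nil => simp [pvSingCount]
  | cons kv rest ih =>
    simp only [List.foldl_cons]
    rcases kv with ⟨k, v⟩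
    by_cases h1 : v.length = 1
    · obtain ⟨x, rfl⟩ := List.length_eq_one_iff.mp h1
      simp only [ih, pvSingCount, List.filter_cons]
      by_cases hs : x = s
      · subst hs
        simp [PySem.List.pyGetD, PySem.Dict.getD_insert_self]
        push_cast
        ring
      · have hx : PySem.List.pyGetD ([x] : List String) 0 "" = x := rfl
        have hc : (([x] : List String).length == 1) = true := rfl
        rw [if_pos hc, hx, PySem.Dict.getD_insert]
        rw [if_neg (fun h => hs h.symm), if_neg (by simp; exact fun h => hs h.symm)]
    · have hb : ¬ ((v.length == 1) = true) := by simp [h1]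
      rw [if_neg hb, ih]
      have : pvSingCount ((k, v) :: rest) s = pvSingCount rest s := by
        simp [pvSingCount, List.filter_cons, h1]
      rw [this]

-- with nodup keys, looking each key of the list up in the dict built from it returns the pair's own value
theorem pv_lookup_self (min_distance_keys : List (String × List String))
    (hnd : (min_distance_keys.map Prod.fst).Nodup) (kv : String × List String)
    (hmem : kv ∈ min_distance_keys) :
    (PySem.Dict.mk min_distance_keys).getD kv.1 [] = kv.2 := by
  induction min_distance_keys with
  | nil => cases hmem
  | cons p rest ih =>
    rcases p with ⟨pk, pv⟩
    rcases List.mem_cons.mp hmem with rfl | hm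
    · simp [PySem.Dict.getD_eq_get?_getD, PySem.Dict.get?_mk_cons]
    · have hfst : kv.1 ∈ rest.map Prod.fst := List.mem_map_of_mem hm
      have hnp : pk ∉ rest.map Prod.fst := by
        simp only [List.map_cons, List.nodup_cons] at hnd; exact hnd.1
      have hne : ¬ ((pk == kv.1) = true) := by
        simp only [beq_iff_eq]
        intro h; rw [← h] at hfst; exact hnp hfst
      rw [PySem.Dict.getD_eq_get?_getD, PySem.Dict.get?_mk_cons, if_neg hne,
        ← PySem.Dict.getD_eq_get?_getD]
      exact ih (by simp only [List.map_cons, List.nodup_cons] at hnd; exact hnd.2) hm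

-- re-inserting a key's current value is a no-op (nodup keys, key present)
theorem pv_insert_getD_self (d : PySem.Dict String Int) (hnd : d.keys.Nodup) (k : String)
    (hc : d.contains k = true) : d.insert k (d.getD k 0) = d := by
  apply PySem.Dict.ext
  rw [PySem.Dict.items_insert_of_contains _ _ hc]
  conv_rhs => rw [← List.map_id d.items]
  apply List.map_congr_left
  intro p hp
  by_cases h : p.1 = k
  · have hp' : (k, p.2) ∈ d.items := by rw [← h]; exact hp
    have hg : d.get? k = some p.2 := PySem.Dict.get?_of_mem_items _ hp' hnd
    have hgd : d.getD k 0 = p.2 := PySem.Dict.getD_of_get?_eq_some _ _ hg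
    have hpe : (k, p.2) = p := by rw [← h]
    simp [h, hgd, hpe]
  · simp [h]

-- A's inner loop, on a dict that contains coord, adds pvSingCount at coord
theorem pv_inner_loop (md : List (String × List String)) (coord : String) :
    ∀ (it : List (String × List String)) (t : PySem.Dict String Int),
    t.keys.Nodup → t.contains coord = true →
    (∀ kv ∈ it, (PySem.Dict.mk md).getD kv.1 [] = kv.2) →
    (it.foldl (fun count_of_closest kv =>
        if ((PySem.Dict.mk md).getD kv.1 []).length == 1 then
          if ((PySem.Dict.mk md).getD kv.1 []).contains coord then
            count_of_closest.modify coord 0 (· + 1)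
          else count_of_closest
        else count_of_closest) t)
      = t.insert coord (t.getD coord 0 + pvSingCount it coord) := by
  intro it
  induction it with
  | nil =>
    intro t hnd hc _
    have h0 : pvSingCount [] coord = 0 := rfl
    rw [List.foldl_nil, h0, add_zero]
    exact (pv_insert_getD_self t hnd coord hc).symm
  | cons kv rest ih =>
    intro t hnd hc hlook
    have hk : (PySem.Dict.mk md).getD kv.1 [] = kv.2 := hlook kv (List.mem_cons_self)
    have hrest : ∀ p ∈ rest, (PySem.Dict.mk md).getD p.1 [] = p.2 :=
      fun p hp => hlook p (List.mem_cons_of_mem _ hp)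
    simp only [List.foldl_cons, hk]
    by_cases h1 : (kv.2.length == 1) = true
    · by_cases h2 : (kv.2.contains coord) = true
      · have hmod : t.modify coord 0 (· + 1) = t.insert coord (t.getD coord 0 + 1) := rfl
        rw [if_pos h1, if_pos h2, hmod,
          ih (t.insert coord (t.getD coord 0 + 1))
            (PySem.Dict.nodup_keys_insert _ _ _ hnd)
            (PySem.Dict.contains_insert_self _ _ _) hrest,
          PySem.Dict.getD_insert_self, PySem.Dict.insert_insert_self]
        have h2' : coord ∈ kv.2 := by simpa using h2
        have hcnt : pvSingCount (kv :: rest) coord = pvSingCount rest coord + 1 := by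
          simp [pvSingCount, List.filter_cons, h1, h2']
        rw [hcnt]
        exact congrArg _ (by ring)
      · rw [if_pos h1, if_neg h2, ih t hnd hc hrest]
        have h2' : coord ∉ kv.2 := by simpa using h2
        have hcnt : pvSingCount (kv :: rest) coord = pvSingCount rest coord := by
          simp [pvSingCount, List.filter_cons, h2']
        rw [hcnt]
    · rw [if_neg h1, ih t hnd hc hrest]
      have hcnt : pvSingCount (kv :: rest) coord = pvSingCount rest coord := by
        simp [pvSingCount, List.filter_cons, h1]
      rw [hcnt]

-- one step of A equals the canonical step
theorem pv_step (min_distance_keys : List (String × List String))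
    (hnd : (min_distance_keys.map Prod.fst).Nodup)
    (d : PySem.Dict String Int) (hd : d.keys.Nodup) (coordinate : Int × Int) :
    (min_distance_keys.foldl (fun count_of_closest kv =>
        if ((PySem.Dict.mk min_distance_keys).getD kv.1 []).length == 1 then
          if ((PySem.Dict.mk min_distance_keys).getD kv.1 []).contains (pvStr coordinate) then
            count_of_closest.modify (pvStr coordinate) 0 (· + 1)
          else count_of_closest
        else count_of_closest)
      (if d.contains (pvStr coordinate) then d else d.insert (pvStr coordinate) 0))
    = pvCanon min_distance_keys d coordinate := by
  have hlook : ∀ kv ∈ min_distance_keys, (PySem.Dict.mk min_distance_keys).getD kv.1 [] = kv.2 :=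
    fun kv hkv => pv_lookup_self min_distance_keys hnd kv hkv
  by_cases hcon : d.contains (pvStr coordinate) = true
  · rw [if_pos hcon]
    exact pv_inner_loop min_distance_keys (pvStr coordinate) min_distance_keys d hd hcon hlook
  · have hcon' : d.contains (pvStr coordinate) = false := by simpa using hcon
    rw [if_neg hcon]
    have hnotmem : pvStr coordinate ∉ d.keys := by
      intro hmem
      rw [PySem.Dict.contains_eq_decide_mem_keys] at hcon'
      simp [hmem] at hcon'
    have hkeys : (d.insert (pvStr coordinate) (0 : Int)).keys.Nodup := by
      rw [PySem.Dict.keys_insert_of_not_contains _ _ hcon']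
      simp [List.nodup_append, hd, hnotmem]
      intro a ha hEq
      exact hnotmem (hEq ▸ ha)
    rw [pv_inner_loop min_distance_keys (pvStr coordinate) min_distance_keys
        (d.insert (pvStr coordinate) 0) hkeys (PySem.Dict.contains_insert_self _ _ _) hlook,
      PySem.Dict.getD_insert_self, PySem.Dict.insert_insert_self]
    unfold pvCanon
    rw [PySem.Dict.getD_of_not_contains _ _ hcon']

-- A's fold equals the canonical fold
theorem pv_foldA (min_distance_keys : List (String × List String))
    (hnd : (min_distance_keys.map Prod.fst).Nodup) :
    ∀ (coords : List (Int × Int)) (d : PySem.Dict String Int), d.keys.Nodup →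
    coords.foldl (fun count_of_closest coordinate =>
      min_distance_keys.foldl (fun count_of_closest kv =>
          if ((PySem.Dict.mk min_distance_keys).getD kv.1 []).length == 1 then
            if ((PySem.Dict.mk min_distance_keys).getD kv.1 []).contains
                (PySem.Int.toStr coordinate.1 ++ ", " ++ PySem.Int.toStr coordinate.2) then
              count_of_closest.modify
                (PySem.Int.toStr coordinate.1 ++ ", " ++ PySem.Int.toStr coordinate.2) 0 (· + 1)
            else count_of_closest
          else count_of_closest)
        (if count_of_closest.contains
            (PySem.Int.toStr coordinate.1 ++ ", " ++ PySem.Int.toStr coordinate.2) then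
          count_of_closest
        else count_of_closest.insert
            (PySem.Int.toStr coordinate.1 ++ ", " ++ PySem.Int.toStr coordinate.2) 0)) d
    = coords.foldl (pvCanon min_distance_keys) d := by
  intro coords
  induction coords with
  | nil => intro d _; rfl
  | cons c cs ih =>
    intro d hd
    simp only [List.foldl_cons]
    rw [show (PySem.Int.toStr c.1 ++ ", " ++ PySem.Int.toStr c.2) = pvStr c from rfl,
      pv_step min_distance_keys hnd d hd c]
    exact ih (pvCanon min_distance_keys d c) (PySem.Dict.nodup_keys_insert _ _ _ hd)

-- B's fold equals the canonical fold
theorem pv_foldB (min_distance_keys : List (String × List String)) :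
    ∀ (coords : List (Int × Int)) (d : PySem.Dict String Int),
    coords.foldl (fun count_of_closest coordinate =>
      count_of_closest.insert
        (PySem.Int.toStr coordinate.1 ++ ", " ++ PySem.Int.toStr coordinate.2)
        (count_of_closest.getD
            (PySem.Int.toStr coordinate.1 ++ ", " ++ PySem.Int.toStr coordinate.2) 0 +
          (min_distance_keys.foldl (fun closest_counter kv =>
              if kv.2.length == 1 then
                closest_counter.insert (PySem.List.pyGetD kv.2 0 "")
                  (closest_counter.getD (PySem.List.pyGetD kv.2 0 "") 0 + 1)
              else closest_counter)
            PySem.Dict.empty).getD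
            (PySem.Int.toStr coordinate.1 ++ ", " ++ PySem.Int.toStr coordinate.2) 0)) d
    = coords.foldl (pvCanon min_distance_keys) d := by
  intro coords
  induction coords with
  | nil => intro d; rfl
  | cons c cs ih =>
    intro d
    simp only [List.foldl_cons]
    rw [pv_counter_getD, PySem.Dict.getD_empty, zero_add,
      show (PySem.Int.toStr c.1 ++ ", " ++ PySem.Int.toStr c.2) = pvStr c from rfl]
    exact ih (pvCanon min_distance_keys d c)

-- ===== VERDICT (by name: the statement is the Claim_ definition above) =====
theorem get_count_of_closest_spec : Claim_equal_get_count_of_closest := by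
  intro set_of_coordinates min_distance_keys _ hpre
  unfold Spec_get_count_of_closest
  simp only [get_count_of_closest, get_count_of_closest_alt]
  rw [pv_foldA min_distance_keys hpre set_of_coordinates PySem.Dict.empty
      PySem.Dict.nodup_keys_empty,
    pv_foldB min_distance_keys set_of_coordinates PySem.Dict.empty]
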